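-- pv_equiv track=rewrite | github.com/LHH90538/ChemEAGLE-0326 | chemietoolkit/helper.py | _select_main_area
-- ===== SOURCE A (Python) =====
-- from typing import List, Optional
--
-- def _select_main_area(agent_names_lower: List[str]) -> str:
--     """Select the main area tool name from a list of agent names (substring match).
--     Priority: structure R-group > text R-group > reaction template > molecular recognition."""
--     priority = [
--         ("structure-based r-group substitution agent", "process_reaction_image_with_product_variant_R_group"),
--         ("text-based r-group substitution agent", "process_reaction_image_with_table_R_group"),
--         ("reaction template parsing agent", "get_full_reaction_template"),
--         ("molecular recognition agent", "get_multi_molecular_full"),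
--     ]
--     for keyword, tool_name in priority:
--         if any(keyword in agent for agent in agent_names_lower):
--             return tool_name
--     return "get_full_reaction_template"
-- ===== SOURCE B (Python) =====
-- from typing import List
--
-- def _select_main_area(agent_names_lower: List[str]) -> str:
--     """Select the main area tool name from a list of agent names (substring match)."""
--     priority = [
--         ("structure-based r-group substitution agent", "process_reaction_image_with_product_variant_R_group"),
--         ("text-based r-group substitution agent", "process_reaction_image_with_table_R_group"),
--         ("reaction template parsing agent", "get_full_reaction_template"),
--         ("molecular recognition agent", "get_multi_molecular_full"),
--     ]
--     n = len(priority)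
--     best = n
--     for agent in agent_names_lower:
--         rank = next((i for i, (kw, _) in enumerate(priority) if kw in agent), n)
--         if rank < best:
--             best = rank
--     return priority[best][1] if best < n else "get_full_reaction_template"
-- ===== Notes on version B (the rewrite author's own statement) =====
-- stated objective: alternative
-- what changed: Inverts the loop nesting: instead of scanning priorities and early-returning on the first keyword that matches any agent, B makes one pass over the agents maintaining a minimum-rank accumulator (rank = first priority index whose keyword occurs in the agent), then indexes the priority list once at the end.
import Mathlib
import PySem

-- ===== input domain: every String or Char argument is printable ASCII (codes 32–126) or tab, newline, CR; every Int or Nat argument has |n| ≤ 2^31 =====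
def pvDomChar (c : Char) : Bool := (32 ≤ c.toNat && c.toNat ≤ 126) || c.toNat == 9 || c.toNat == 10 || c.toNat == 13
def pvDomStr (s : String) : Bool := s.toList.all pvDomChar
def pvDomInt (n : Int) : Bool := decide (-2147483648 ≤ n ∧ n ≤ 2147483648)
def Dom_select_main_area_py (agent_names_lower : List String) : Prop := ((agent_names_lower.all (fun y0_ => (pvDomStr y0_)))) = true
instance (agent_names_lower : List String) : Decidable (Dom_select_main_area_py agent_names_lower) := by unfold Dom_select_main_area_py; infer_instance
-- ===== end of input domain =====

-- B inverts A's loop nesting: agent-major pass with a minimum-rank accumulator instead of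
-- priority-major scan with early return (objective: alternative; same result, same cost).

-- ===== PORT A =====
def priorityA : List (String × String) :=
  [("structure-based r-group substitution agent", "process_reaction_image_with_product_variant_R_group"),
   ("text-based r-group substitution agent", "process_reaction_image_with_table_R_group"),
   ("reaction template parsing agent", "get_full_reaction_template"),
   ("molecular recognition agent", "get_multi_molecular_full")]

-- the 'for keyword, tool_name in priority' loop with its early return
def selectLoopA (agent_names_lower : List String) : List (String × String) → String
  | [] => "get_full_reaction_template"
  | (keyword, tool_name) :: rest =>
    if agent_names_lower.any (fun agent => PySem.Str.isIn keyword agent) then tool_name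
    else selectLoopA agent_names_lower rest

def select_main_area_py (agent_names_lower : List String) : String :=
  selectLoopA agent_names_lower priorityA

-- ===== PORT B =====
def priorityB : List (String × String) :=
  [("structure-based r-group substitution agent", "process_reaction_image_with_product_variant_R_group"),
   ("text-based r-group substitution agent", "process_reaction_image_with_table_R_group"),
   ("reaction template parsing agent", "get_full_reaction_template"),
   ("molecular recognition agent", "get_multi_molecular_full")]

-- 'next((i for i, (kw, _) in enumerate(priority) if kw in agent), n)'
def rankB (agent : String) : List (String × String) → Nat → Nat
  | [], i => i
  | (kw, _) :: rest, i =>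
    if PySem.Str.isIn kw agent then i else rankB agent rest (i + 1)

def select_main_area_py_alt (agent_names_lower : List String) : String :=
  let n := priorityB.length
  let best := agent_names_lower.foldl
    (fun best agent =>
      let rank := rankB agent priorityB 0
      if rank < best then rank else best) n
  -- 'priority[best][1] if best < n else …'; best < n guarantees the index is in range
  if best < n then ((priorityB.getD best ("", "")).2) else "get_full_reaction_template"

-- ===== PRECONDITION & SPEC =====
def Spec_select_main_area_py (agent_names_lower : List String) (out : String) : Prop := out = select_main_area_py_alt agent_names_lower
instance (agent_names_lower : List String) (out : String) : Decidable (Spec_select_main_area_py agent_names_lower out) := by unfold Spec_select_main_area_py; infer_instance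

-- ===== CLAIM (what is proved, stated in full; the proofs are below) =====
def Claim_equal_select_main_area_py : Prop := ∀ (agent_names_lower : List String), Dom_select_main_area_py agent_names_lower → Spec_select_main_area_py agent_names_lower (select_main_area_py agent_names_lower)

-- ===== LEMMAS AND PROOFS =====

-- rankB on the literal priority list is the 4-way nested conditional
theorem rankB_char (a : String) :
    rankB a priorityB 0 =
      (if PySem.Str.isIn "structure-based r-group substitution agent" a then 0
       else if PySem.Str.isIn "text-based r-group substitution agent" a then 1
       else if PySem.Str.isIn "reaction template parsing agent" a then 2
       else if PySem.Str.isIn "molecular recognition agent" a then 3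
       else 4) := by
  rfl

-- every rank is ≤ 4
theorem rankB_le (a : String) : rankB a priorityB 0 ≤ 4 := by
  rw [rankB_char]; split_ifs <;> omega

-- B's foldl accumulator is a running minimum
theorem foldl_min_acc (xs : List String) : ∀ b : Nat, b ≤ 4 →
    xs.foldl (fun best agent =>
      if rankB agent priorityB 0 < best then rankB agent priorityB 0 else best) b
    = min b (xs.foldl (fun best agent =>
        if rankB agent priorityB 0 < best then rankB agent priorityB 0 else best) 4) := by
  induction xs with
  | nil => intro b hb; simp; omega
  | cons a xs ih =>
    intro b hb
    simp only [List.foldl_cons]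
    have hr := rankB_le a
    rw [show (if rankB a priorityB 0 < 4 then rankB a priorityB 0 else 4)
          = rankB a priorityB 0 from by split_ifs <;> omega]
    rw [ih (if rankB a priorityB 0 < b then rankB a priorityB 0 else b) (by split_ifs <;> omega),
        ih (rankB a priorityB 0) hr]
    split_ifs <;> omega

-- min of two first-match ranks is the first-match rank of the disjunctions
theorem min_rank (a0 a1 a2 a3 b0 b1 b2 b3 : Bool) :
    min (if a0 then 0 else if a1 then 1 else if a2 then 2 else if a3 then 3 else 4)
        (if b0 then 0 else if b1 then 1 else if b2 then 2 else if b3 then 3 else 4)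
    = (if (a0 || b0) then 0 else if (a1 || b1) then 1 else if (a2 || b2) then 2
       else if (a3 || b3) then 3 else (4 : Nat)) := by
  revert a0 a1 a2 a3 b0 b1 b2 b3; decide

-- characterisation of B's best index in terms of A's 'any' tests
theorem best_char (xs : List String) :
    xs.foldl (fun best agent =>
      if rankB agent priorityB 0 < best then rankB agent priorityB 0 else best) 4
    = (if xs.any (fun a => PySem.Str.isIn "structure-based r-group substitution agent" a) then 0
       else if xs.any (fun a => PySem.Str.isIn "text-based r-group substitution agent" a) then 1
       else if xs.any (fun a => PySem.Str.isIn "reaction template parsing agent" a) then 2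
       else if xs.any (fun a => PySem.Str.isIn "molecular recognition agent" a) then 3
       else 4) := by
  induction xs with
  | nil => simp
  | cons a xs ih =>
    simp only [List.foldl_cons, List.any_cons]
    have h4 : (if rankB a priorityB 0 < 4 then rankB a priorityB 0 else 4) ≤ 4 := by
      split_ifs <;> omega
    rw [foldl_min_acc _ _ h4, ih]
    have hr : (if rankB a priorityB 0 < 4 then rankB a priorityB 0 else 4)
        = rankB a priorityB 0 := by
      have := rankB_le a; split_ifs <;> omega
    rw [hr, rankB_char a, min_rank]
    rfl

-- ===== VERDICT (by name: the statement is the Claim_ definition above) =====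
theorem select_main_area_py_spec : Claim_equal_select_main_area_py := by
  intro xs _
  unfold Spec_select_main_area_py select_main_area_py select_main_area_py_alt
  simp only [show priorityB.length = 4 from rfl, best_char]
  simp only [selectLoopA, priorityA]
  split_ifs <;> first | rfl | omega
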